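-- pv_equiv track=rewrite | github.com/Lord1Wizard/Dive-into-Python | 1/yutube.py | free_urinals
-- ===== SOURCE A (Python) =====
-- def free_urinals(urinals :str)->int:
--     if '11' in urinals:
--         return -1
--     rez=0
--     for i in range(len(urinals),2,-1):
--         rez+=urinals.count('0'*i)*int((i-1)/2)
--         urinals=urinals.replace('0'*i,'')
--     return rez
-- ===== SOURCE B (Python) =====
-- def free_urinals(urinals: str) -> int:
--     # Single left-to-right pass: -1 if two adjacent occupied, else each maximal
--     # run of L zeros contributes (L-1)//2 seatable urinals.
--     if '11' in urinals:
--         return -1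
--     total = 0
--     run = 0
--     for c in urinals:
--         if c == '0':
--             run += 1
--         elif run:
--             total += (run - 1) // 2
--             run = 0
--     if run:
--         total += (run - 1) // 2
--     return total
-- ===== Notes on version B (the rewrite author's own statement) =====
-- stated objective: faster
-- what changed: Replaced A's repeated count('0'*i)/replace scans for every i from len(s) down to 3 (rebuilding the string each round) by a single left-to-right pass that accumulates the length of each maximal run of '0's and adds (L-1)//2 per run.
import Mathlib
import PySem

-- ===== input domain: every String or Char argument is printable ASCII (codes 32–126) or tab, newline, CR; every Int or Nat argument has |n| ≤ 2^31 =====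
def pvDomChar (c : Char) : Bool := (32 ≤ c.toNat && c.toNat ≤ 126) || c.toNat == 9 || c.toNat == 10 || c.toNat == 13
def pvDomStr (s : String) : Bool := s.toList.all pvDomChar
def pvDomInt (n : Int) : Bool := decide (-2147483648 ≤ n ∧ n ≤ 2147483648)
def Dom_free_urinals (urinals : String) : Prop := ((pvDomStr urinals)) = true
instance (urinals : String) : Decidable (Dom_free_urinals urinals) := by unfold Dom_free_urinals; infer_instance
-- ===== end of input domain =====

-- B replaces A's O(n^2) count/replace rounds by one O(n) pass over the maximal zero-runs.

-- ===== PORT A =====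
-- A's string state is ported on .toList (PySem string primitives are defined on List Char).
-- int((i-1)/2) is ported as floor division: exact here, since every i of range(len,2,-1) has i-1 ≥ 2 > 0.
def free_urinals (urinals : String) : Int :=
  if PySem.Str.isIn "11" urinals then -1
  else
    ((PySem.List.pyRange (PySem.Str.len urinals) 2 (-1)).foldl
      (fun (st : Int × List Char) i =>
        (st.1 + (PySem.Chars.count st.2 (PySem.List.pyRepeat ['0'] i) : Int)
              * PySem.Int.floordiv (i - 1) 2,
         PySem.Chars.replace st.2 (PySem.List.pyRepeat ['0'] i) []))
      (0, urinals.toList)).1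

-- ===== PORT B =====
def free_urinals_alt (urinals : String) : Int :=
  if PySem.Str.isIn "11" urinals then -1
  else
    let st := urinals.toList.foldl
      (fun (st : Int × Int) c =>
        if c = '0' then (st.1, st.2 + 1)
        else if st.2 ≠ 0 then (st.1 + PySem.Int.floordiv (st.2 - 1) 2, (0 : Int))
        else st)
      ((0 : Int), (0 : Int))
    if st.2 ≠ 0 then st.1 + PySem.Int.floordiv (st.2 - 1) 2 else st.1

-- ===== PRECONDITION & SPEC =====
def Spec_free_urinals (urinals : String) (out : Int) : Prop := out = free_urinals_alt urinals
instance (urinals : String) (out : Int) : Decidable (Spec_free_urinals urinals out) := by unfold Spec_free_urinals; infer_instance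

-- ===== CLAIM (what is proved, stated in full; the proofs are below) =====
def Claim_equal_free_urinals : Prop := ∀ (urinals : String), Dom_free_urinals urinals → Spec_free_urinals urinals (free_urinals urinals)

-- ===== LEMMAS AND PROOFS =====

-- run lengths of the maximal '0'-runs of s, with r zeros already pending on the left
-- (includes the zero-length runs between/around non-'0' characters; they contribute 0 below)
def rlens : List Char → Nat → List Nat
  | [], r => [r]
  | c :: t, r => if c = '0' then rlens t (r + 1) else r :: rlens t 0

-- the seat count determined by a list of run lengths
def S (l : List Nat) : Nat := (l.map (fun L => (L - 1) / 2)).sum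

-- structural versions of Chars.count / Chars.replace specialised to the pattern '0'^i
def cspec (i : Nat) : List Char → Nat
  | [] => 0
  | c :: t =>
    if (List.replicate i '0').isPrefixOf (c :: t) then cspec i (t.drop (i - 1)) + 1
    else cspec i t
termination_by s => s.length
decreasing_by
  · simp [List.length_drop]
  · simp

def rspec (i : Nat) : List Char → List Char
  | [] => []
  | c :: t =>
    if (List.replicate i '0').isPrefixOf (c :: t) then rspec i (t.drop (i - 1))
    else c :: rspec i t
termination_by s => s.length
decreasing_by
  · simp [List.length_drop]
  · simp

theorem rlens_cons_ne (c : Char) (t : List Char) (r : Nat) (hc : c ≠ '0') :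
    rlens (c :: t) r = r :: rlens t 0 := by simp [rlens, hc]

theorem rlens_cons_zero (t : List Char) (r : Nat) : rlens ('0' :: t) r = rlens t (r + 1) := by
  simp [rlens]

theorem rlens_rep_append (a : Nat) (t : List Char) (r : Nat) :
    rlens (List.replicate a '0' ++ t) r = rlens t (r + a) := by
  induction a generalizing r with
  | zero => simp
  | succ a ih =>
    rw [List.replicate_succ, List.cons_append, rlens_cons_zero, ih]
    congr 1
    omega

theorem rlens_rep (a r : Nat) : rlens (List.replicate a '0') r = [r + a] := by
  rw [← List.append_nil (List.replicate a '0'), rlens_rep_append]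
  rfl

theorem mem_rlens_le : ∀ (s : List Char) (r L : Nat), L ∈ rlens s r → L ≤ r + s.length := by
  intro s
  induction s with
  | nil => intro r L h; simp [rlens] at h; omega
  | cons c t ih =>
    intro r L h
    by_cases hc : c = '0'
    · subst hc
      rw [rlens_cons_zero] at h
      have := ih (r + 1) L h
      simp only [List.length_cons]
      omega
    · rw [rlens_cons_ne c t r hc] at h
      rcases List.mem_cons.mp h with rfl | h
      · simp
      · have := ih 0 L h
        simp only [List.length_cons]
        omega

theorem decomp (s : List Char) :
    s = List.replicate (s.takeWhile (· == '0')).length '0' ++ s.dropWhile (· == '0') := by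
  conv_lhs => rw [← List.takeWhile_append_dropWhile (p := (· == '0')) (l := s)]
  congr 1
  apply List.eq_replicate_of_mem
  intro b hb
  have := List.mem_takeWhile_imp hb
  simpa using this

theorem dropWhile_head (s : List Char) :
    s.dropWhile (· == '0') = [] ∨
      ∃ c t, s.dropWhile (· == '0') = c :: t ∧ c ≠ '0' := by
  induction s with
  | nil => left; rfl
  | cons a s ih =>
    by_cases ha : a = '0'
    · subst ha; simpa using ih
    · right; exact ⟨a, s, by simp [ha], ha⟩

theorem not_rep_prefix (i a : Nat) (t : List Char) (ha : a < i)
    (ht : t = [] ∨ ∃ c t', t = c :: t' ∧ c ≠ '0') :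
    (List.replicate i '0').isPrefixOf (List.replicate a '0' ++ t) = false := by
  rw [← Bool.not_eq_true, List.isPrefixOf_iff_prefix]
  intro h
  rcases ht with rfl | ⟨c, t', rfl, hc⟩
  · have := h.length_le
    simp at this
    omega
  · obtain ⟨u, hu⟩ := h
    have h1 : (List.replicate i '0' ++ u)[a]? = some '0' := by
      rw [List.getElem?_append_left (by simpa using ha)]
      simp [ha]
    rw [hu] at h1
    have h2 : (List.replicate a '0' ++ c :: t')[a]? = some c := by
      rw [List.getElem?_append_right (by simp)]
      simp
    rw [h1] at h2
    exact hc (by injection h2 with h3; exact h3.symm)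

theorem cspec_cons_ne (i : Nat) (c : Char) (t : List Char) (_hi : 1 ≤ i) (hc : c ≠ '0') :
    cspec i (c :: t) = cspec i t := by
  obtain ⟨j, rfl⟩ : ∃ j, i = j + 1 := ⟨i - 1, by omega⟩
  rw [cspec]
  have : (List.replicate (j + 1) '0').isPrefixOf (c :: t) = false := by
    rw [List.replicate_succ]
    simp [List.isPrefixOf, Ne.symm hc]
  simp [this]

theorem rspec_cons_ne (i : Nat) (c : Char) (t : List Char) (_hi : 1 ≤ i) (hc : c ≠ '0') :
    rspec i (c :: t) = c :: rspec i t := by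
  obtain ⟨j, rfl⟩ : ∃ j, i = j + 1 := ⟨i - 1, by omega⟩
  rw [rspec]
  have : (List.replicate (j + 1) '0').isPrefixOf (c :: t) = false := by
    rw [List.replicate_succ]
    simp [List.isPrefixOf, Ne.symm hc]
  simp [this]

theorem cspec_run_lt (i a : Nat) (t : List Char) (_hi : 1 ≤ i)
    (ht : t = [] ∨ ∃ c t', t = c :: t' ∧ c ≠ '0') :
    a < i → cspec i (List.replicate a '0' ++ t) = cspec i t := by
  induction a with
  | zero => intro _; simp
  | succ a ih =>
    intro ha
    have hpre := not_rep_prefix i (a + 1) t ha ht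
    rw [List.replicate_succ] at hpre ⊢
    rw [List.cons_append] at hpre ⊢
    rw [cspec, hpre]
    simp only [Bool.false_eq_true, if_false]
    exact ih (by omega)

theorem rspec_run_lt (i a : Nat) (t : List Char) (_hi : 1 ≤ i)
    (ht : t = [] ∨ ∃ c t', t = c :: t' ∧ c ≠ '0') :
    a < i → rspec i (List.replicate a '0' ++ t) = List.replicate a '0' ++ rspec i t := by
  induction a with
  | zero => intro _; simp
  | succ a ih =>
    intro ha
    have hpre := not_rep_prefix i (a + 1) t ha ht
    rw [List.replicate_succ] at hpre ⊢
    rw [List.cons_append] at hpre ⊢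
    rw [rspec, hpre]
    simp only [Bool.false_eq_true, if_false, List.cons_append]
    rw [ih (by omega)]

theorem rep_prefix (j : Nat) (t : List Char) :
    (List.replicate (j + 1) '0').isPrefixOf ('0' :: (List.replicate j '0' ++ t)) = true := by
  rw [List.isPrefixOf_iff_prefix]
  exact ⟨t, by simp [List.replicate_succ]⟩

theorem drop_run (j : Nat) (t : List Char) :
    (List.replicate j '0' ++ t).drop (j + 1 - 1) = t := by
  have : j + 1 - 1 = (List.replicate j '0').length := by simp
  rw [this, List.drop_left]

theorem cspec_run_eq (i : Nat) (t : List Char) (hi : 1 ≤ i) :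
    cspec i (List.replicate i '0' ++ t) = cspec i t + 1 := by
  obtain ⟨j, rfl⟩ : ∃ j, i = j + 1 := ⟨i - 1, by omega⟩
  rw [List.replicate_succ, List.cons_append, cspec, rep_prefix, drop_run]
  simp

theorem rspec_run_eq (i : Nat) (t : List Char) (hi : 1 ≤ i) :
    rspec i (List.replicate i '0' ++ t) = rspec i t := by
  obtain ⟨j, rfl⟩ : ∃ j, i = j + 1 := ⟨i - 1, by omega⟩
  rw [List.replicate_succ, List.cons_append, rspec, rep_prefix, drop_run]
  simp

-- cspec counts, among the run lengths, the runs of length exactly i (when every run has length ≤ i)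
theorem cspec_eq_count (i : Nat) (hi : 1 ≤ i) :
    ∀ n s, List.length s ≤ n → (∀ L ∈ rlens s 0, L ≤ i) →
      cspec i s = (rlens s 0).count i := by
  intro n
  induction n with
  | zero =>
    intro s hs _
    have hnil : s = [] := List.length_eq_zero_iff.mp (by omega)
    subst hnil
    simp [cspec, rlens, List.count_singleton]
    omega
  | succ n ih =>
    intro s hs hb
    have ht := dropWhile_head s
    have hdecomp := decomp s
    set a := (s.takeWhile (· == '0')).length with hadef
    set t := s.dropWhile (· == '0') with htdef
    have hrl : rlens s 0 = rlens t a := by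
      rw [hdecomp, rlens_rep_append]; simp
    rcases ht with h0 | ⟨c, t', h1, hc⟩
    · have hrl2 : rlens s 0 = [a] := by rw [hrl, h0]; rfl
      have hai : a ≤ i := hb a (by rw [hrl2]; simp)
      rcases Nat.lt_or_ge a i with hlt | hge
      · rw [hrl2, hdecomp, h0, cspec_run_lt i a [] hi (Or.inl rfl) hlt]
        simp [cspec, List.count_singleton']
        omega
      · have hae : a = i := by omega
        rw [hrl2, hdecomp, h0, hae, cspec_run_eq i [] hi]
        simp [cspec]
    · have hrl2 : rlens s 0 = a :: rlens t' 0 := by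
        rw [hrl, h1, rlens_cons_ne c t' a hc]
      have hai : a ≤ i := hb a (by rw [hrl2]; simp)
      have hlen : t'.length ≤ n := by
        have := congrArg List.length hdecomp
        rw [h1] at this
        simp at this
        omega
      have hb' : ∀ L ∈ rlens t' 0, L ≤ i := by
        intro L hL; exact hb L (by rw [hrl2]; simp [hL])
      have hIH := ih t' hlen hb'
      rcases Nat.lt_or_ge a i with hlt | hge
      · rw [hrl2, hdecomp, h1, cspec_run_lt i a (c :: t') hi (Or.inr ⟨c, t', rfl, hc⟩) hlt,
          cspec_cons_ne i c t' hi hc, hIH, List.count_cons]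
        simp
        omega
      · have hae : a = i := by omega
        rw [hrl2, hdecomp, h1, hae, cspec_run_eq i (c :: t') hi,
          cspec_cons_ne i c t' hi hc, hIH, List.count_cons]
        simp

-- rspec deletes exactly the runs of length i (when every run has length ≤ i):
-- on the run lengths it maps i to 0 and keeps everything else
theorem rspec_rlens (i : Nat) (hi : 1 ≤ i) :
    ∀ n s, List.length s ≤ n → (∀ L ∈ rlens s 0, L ≤ i) →
      rlens (rspec i s) 0 = (rlens s 0).map (fun L => if L = i then 0 else L) := by
  intro n
  induction n with
  | zero =>
    intro s hs _
    have hnil : s = [] := List.length_eq_zero_iff.mp (by omega)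
    subst hnil
    simp [rspec, rlens]
  | succ n ih =>
    intro s hs hb
    have ht := dropWhile_head s
    have hdecomp := decomp s
    set a := (s.takeWhile (· == '0')).length with hadef
    set t := s.dropWhile (· == '0') with htdef
    have hrl : rlens s 0 = rlens t a := by
      rw [hdecomp, rlens_rep_append]; simp
    rcases ht with h0 | ⟨c, t', h1, hc⟩
    · have hrl2 : rlens s 0 = [a] := by rw [hrl, h0]; rfl
      have hai : a ≤ i := hb a (by rw [hrl2]; simp)
      rcases Nat.lt_or_ge a i with hlt | hge
      · rw [hrl2, hdecomp, h0, rspec_run_lt i a [] hi (Or.inl rfl) hlt]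
        simp [rspec, rlens_rep, show ¬ a = i by omega]
      · have hae : a = i := by omega
        rw [hrl2, hdecomp, h0, hae, rspec_run_eq i [] hi]
        simp [rspec, rlens]
    · have hrl2 : rlens s 0 = a :: rlens t' 0 := by
        rw [hrl, h1, rlens_cons_ne c t' a hc]
      have hai : a ≤ i := hb a (by rw [hrl2]; simp)
      have hlen : t'.length ≤ n := by
        have := congrArg List.length hdecomp
        rw [h1] at this
        simp at this
        omega
      have hb' : ∀ L ∈ rlens t' 0, L ≤ i := by
        intro L hL; exact hb L (by rw [hrl2]; simp [hL])
      have hIH := ih t' hlen hb'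
      rcases Nat.lt_or_ge a i with hlt | hge
      · rw [hrl2, hdecomp, h1, rspec_run_lt i a (c :: t') hi (Or.inr ⟨c, t', rfl, hc⟩) hlt,
          rspec_cons_ne i c t' hi hc, rlens_rep_append, rlens_cons_ne c _ (0 + a) hc, hIH]
        simp [show ¬ a = i by omega]
      · have hae : a = i := by omega
        rw [hrl2, hdecomp, h1, hae, rspec_run_eq i (c :: t') hi,
          rspec_cons_ne i c t' hi hc, rlens_cons_ne c _ 0 hc, hIH]
        simp

-- bridging PySem.Chars.count / replace to cspec / rspec via their fuelled workers
theorem count_go_eq (i : Nat) (hi : 1 ≤ i) :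
    ∀ (fuel : Nat) (l : List Char) (acc : Nat), l.length ≤ fuel →
      PySem.Chars.count.go (List.replicate i '0') fuel l acc = acc + cspec i l := by
  intro fuel
  induction fuel with
  | zero =>
    intro l acc hl
    have : l = [] := List.length_eq_zero_iff.mp (by omega)
    subst this
    simp [PySem.Chars.count.go, cspec]
  | succ fuel ih =>
    intro l acc hl
    cases l with
    | nil => simp [PySem.Chars.count.go, cspec]
    | cons c t =>
      rw [PySem.Chars.count.go]
      by_cases hpre : (List.replicate i '0').isPrefixOf (c :: t) = true
      · rw [if_pos hpre]
        have hdrop : (c :: t).drop (List.replicate i '0').length = t.drop (i - 1) := by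
          obtain ⟨j, rfl⟩ : ∃ j, i = j + 1 := ⟨i - 1, by omega⟩
          simp
        rw [hdrop, ih _ _ (by simp at hl ⊢; omega)]
        rw [cspec, if_pos hpre]
        omega
      · rw [if_neg hpre, ih t acc (by simp at hl; omega), cspec,
          if_neg hpre]

theorem count_eq_cspec (i : Nat) (hi : 1 ≤ i) (s : List Char) :
    PySem.Chars.count s (List.replicate i '0') = cspec i s := by
  rw [PySem.Chars.count]
  have : (List.replicate i '0').isEmpty = false := by
    obtain ⟨j, rfl⟩ : ∃ j, i = j + 1 := ⟨i - 1, by omega⟩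
    simp [List.replicate_succ]
  rw [this]
  simpa using count_go_eq i hi s.length s 0 le_rfl

theorem replace_go_eq (i : Nat) (hi : 1 ≤ i) :
    ∀ (fuel : Nat) (l acc : List Char), l.length ≤ fuel →
      PySem.Chars.replace.go (List.replicate i '0') [] fuel l acc = acc.reverse ++ rspec i l := by
  intro fuel
  induction fuel with
  | zero =>
    intro l acc hl
    have : l = [] := List.length_eq_zero_iff.mp (by omega)
    subst this
    simp [PySem.Chars.replace.go, rspec]
  | succ fuel ih =>
    intro l acc hl
    cases l with
    | nil => simp [PySem.Chars.replace.go, rspec]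
    | cons c t =>
      rw [PySem.Chars.replace.go]
      by_cases hpre : (List.replicate i '0').isPrefixOf (c :: t) = true
      · rw [if_pos hpre]
        have hdrop : (c :: t).drop (List.replicate i '0').length = t.drop (i - 1) := by
          obtain ⟨j, rfl⟩ : ∃ j, i = j + 1 := ⟨i - 1, by omega⟩
          simp
        rw [hdrop]
        simp only [List.reverse_nil, List.nil_append]
        rw [ih _ _ (by simp at hl ⊢; omega)]
        rw [rspec, if_pos hpre]
      · rw [if_neg hpre, ih t (c :: acc) (by simp at hl; omega), rspec,
          if_neg hpre]
        simp

theorem replace_eq_rspec (i : Nat) (hi : 1 ≤ i) (s : List Char) :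
    PySem.Chars.replace s (List.replicate i '0') [] = rspec i s := by
  rw [PySem.Chars.replace]
  have : (List.replicate i '0').isEmpty = false := by
    obtain ⟨j, rfl⟩ : ∃ j, i = j + 1 := ⟨i - 1, by omega⟩
    simp [List.replicate_succ]
  rw [this]
  simpa using replace_go_eq i hi s.length s [] le_rfl

-- arithmetic on the run-length list
theorem S_map_filter (i : Nat) (l : List Nat) :
    S l = l.count i * ((i - 1) / 2) + S (l.map fun L => if L = i then 0 else L) := by
  induction l with
  | nil => simp [S]
  | cons L l ih =>
    simp only [S, List.map_cons, List.map_map, List.sum_cons] at ih ⊢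
    rw [ih, List.count_cons]
    by_cases hL : L = i
    · subst hL
      simp only [BEq.rfl, if_true]
      rw [Nat.add_mul, Nat.one_mul]
      omega
    · have hba : (L == i) = false := beq_eq_false_iff_ne.mpr hL
      simp only [hba, hL, if_false, Bool.false_eq_true, Nat.add_zero]
      omega

theorem S_small (l : List Nat) (h : ∀ L ∈ l, L ≤ 2) : S l = 0 := by
  induction l with
  | nil => simp [S]
  | cons L l ih =>
    have h1 := h L (by simp)
    have h2 : S l = 0 := ih (fun L hL => h L (by simp [hL]))
    simp only [S, List.map_cons, List.sum_cons] at h2 ⊢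
    omega

-- A's loop: processing i = i0+2, i0+1, …, 3 on a string whose runs are all ≤ i0+2
theorem Afold (i0 : Nat) : ∀ (s : List Char) (acc : Int),
    (∀ L ∈ rlens s 0, L ≤ i0 + 2) →
    ((PySem.List.pyRange ((i0 : Int) + 2) 2 (-1)).foldl
      (fun (st : Int × List Char) i =>
        (st.1 + (PySem.Chars.count st.2 (PySem.List.pyRepeat ['0'] i) : Int)
              * PySem.Int.floordiv (i - 1) 2,
         PySem.Chars.replace st.2 (PySem.List.pyRepeat ['0'] i) []))
      (acc, s)).1 = acc + (S (rlens s 0) : Int) := by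
  induction i0 with
  | zero =>
    intro s acc hb
    rw [show ((0 : Nat) : Int) + 2 = 2 by norm_num, PySem.List.pyRange_neg_one_eq_nil le_rfl]
    have hS : S (rlens s 0) = 0 := S_small _ (fun L hL => by have := hb L hL; omega)
    simp [hS]
  | succ i0 ih =>
    intro s acc hb
    have hcons : PySem.List.pyRange (((i0 + 1 : Nat) : Int) + 2) 2 (-1)
        = (((i0 + 1 : Nat) : Int) + 2) :: PySem.List.pyRange ((i0 : Int) + 2) 2 (-1) := by
      rw [PySem.List.pyRange_neg_one_cons (by push_cast; omega),
        show (((i0 + 1 : Nat) : Int) + 2) - 1 = ((i0 : Int) + 2) by push_cast; ring]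
    rw [hcons, List.foldl_cons]
    have hi : 1 ≤ i0 + 3 := by omega
    have hrep : PySem.List.pyRepeat ['0'] (((i0 + 1 : Nat) : Int) + 2)
        = List.replicate (i0 + 3) '0' := by
      rw [PySem.List.pyRepeat_singleton]
      congr 1
    have hb' : ∀ L ∈ rlens s 0, L ≤ i0 + 3 := by
      intro L hL; have := hb L hL; omega
    have hcnt : PySem.Chars.count s (List.replicate (i0 + 3) '0')
        = (rlens s 0).count (i0 + 3) := by
      rw [count_eq_cspec _ hi, cspec_eq_count (i0 + 3) hi s.length s le_rfl hb']
    have hrepl : PySem.Chars.replace s (List.replicate (i0 + 3) '0') []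
        = rspec (i0 + 3) s := replace_eq_rspec _ hi s
    have hfd : PySem.Int.floordiv ((((i0 + 1 : Nat) : Int) + 2) - 1) 2
        = (((i0 + 2) / 2 : Nat) : Int) := by
      rw [show (((i0 + 1 : Nat) : Int) + 2) - 1 = ((i0 + 2 : Nat) : Int) by push_cast; omega]
      exact PySem.Int.floordiv_natCast (i0 + 2) 2
    have hrl' : rlens (rspec (i0 + 3) s) 0
        = (rlens s 0).map (fun L => if L = i0 + 3 then 0 else L) :=
      rspec_rlens (i0 + 3) hi s.length s le_rfl hb'
    have hb'' : ∀ L ∈ rlens (rspec (i0 + 3) s) 0, L ≤ i0 + 2 := by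
      intro L hL
      rw [hrl'] at hL
      obtain ⟨L', hL', rfl⟩ := List.mem_map.mp hL
      have := hb L' hL'
      by_cases h : L' = i0 + 3 <;> simp [h] <;> omega
    rw [hrep, hcnt, hrepl, hfd, ih _ _ hb'', hrl']
    have := S_map_filter (i0 + 3) (rlens s 0)
    rw [show (i0 + 3 - 1) / 2 = (i0 + 2) / 2 by omega] at this
    rw [this]
    push_cast
    ring

-- B's loop, abbreviated for the proof (definitionally equal to the lambdas in the port)
def bstep (st : Int × Int) (c : Char) : Int × Int :=
  if c = '0' then (st.1, st.2 + 1)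
  else if st.2 ≠ 0 then (st.1 + PySem.Int.floordiv (st.2 - 1) 2, (0 : Int))
  else st

def bflush (st : Int × Int) : Int :=
  if st.2 ≠ 0 then st.1 + PySem.Int.floordiv (st.2 - 1) 2 else st.1

theorem fd2_natCast (r : Nat) (hr : r ≠ 0) :
    PySem.Int.floordiv ((r : Int) - 1) 2 = (((r - 1) / 2 : Nat) : Int) := by
  rw [show ((r : Int) - 1) = ((r - 1 : Nat) : Int) by omega]
  exact_mod_cast PySem.Int.floordiv_natCast (r - 1) 2

-- B's loop with r zeros pending
theorem Bfold : ∀ (s : List Char) (total : Int) (r : Nat),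
    bflush (s.foldl bstep (total, (r : Int))) = total + (S (rlens s r) : Int) := by
  intro s
  induction s with
  | nil =>
    intro total r
    by_cases hr : r = 0
    · subst hr; simp [bflush, rlens, S]
    · have hne : ((r : Int)) ≠ 0 := by exact_mod_cast hr
      simp only [List.foldl_nil, bflush, hne, ne_eq, not_false_iff, if_true]
      rw [fd2_natCast r hr]
      simp [rlens, S]
  | cons c t ih =>
    intro total r
    rw [List.foldl_cons]
    by_cases hc : c = '0'
    · subst hc
      have hb2 : bstep (total, (r : Int)) '0' = (total, ((r + 1 : Nat) : Int)) := by
        unfold bstep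
        rw [if_pos rfl]
        simp
      rw [hb2, ih total (r + 1), rlens_cons_zero]
    · by_cases hr : r = 0
      · subst hr
        have hb0 : bstep (total, ((0 : Nat) : Int)) c = (total, ((0 : Nat) : Int)) := by
          unfold bstep
          rw [if_neg hc, if_neg (by simp)]
        rw [hb0, ih total 0, rlens_cons_ne c t 0 hc]
        simp [S]
      · have hne : ((r : Int)) ≠ 0 := by exact_mod_cast hr
        have hb1 : bstep (total, (r : Int)) c
            = (total + PySem.Int.floordiv ((r : Int) - 1) 2, ((0 : Nat) : Int)) := by
          unfold bstep
          rw [if_neg hc, if_pos hne]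
          simp
        rw [hb1, ih _ 0, rlens_cons_ne c t r hc, fd2_natCast r hr]
        simp only [S, List.map_cons, List.sum_cons]
        push_cast
        ring

-- ===== VERDICT (by name: the statement is the Claim_ definition above) =====
theorem free_urinals_spec : Claim_equal_free_urinals := by
  intro urinals _
  unfold Spec_free_urinals free_urinals free_urinals_alt
  by_cases h : PySem.Str.isIn "11" urinals = true
  · rw [if_pos h, if_pos h]
  · rw [if_neg h, if_neg h]
    refine Eq.trans ?_ (Bfold urinals.toList 0 0).symm
    have hbound := fun L hL => mem_rlens_le urinals.toList 0 L hL
    have hlen : PySem.Str.len urinals = (urinals.toList.length : Int) := by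
      simp [pysem]
    rcases Nat.lt_or_ge urinals.toList.length 3 with hsm | hlg
    · rw [hlen,
        PySem.List.pyRange_neg_one_eq_nil (show (urinals.toList.length : Int) ≤ 2 by omega)]
      have hS : S (rlens urinals.toList 0) = 0 :=
        S_small _ (fun L hL => by have := hbound L hL; omega)
      simp [hS]
    · rw [hlen,
        show ((urinals.toList.length : Nat) : Int)
            = ((urinals.toList.length - 2 : Nat) : Int) + 2 by omega,
        Afold (urinals.toList.length - 2) urinals.toList 0
          (fun L hL => by have := hbound L hL; omega)]
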